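-- pv_equiv track=rewrite | github.com/dcschenc/myleetcode | 1561-rearrange-words-in-a-sentence/1561-rearrange-words-in-a-sentence.py | arrangeWords
-- ===== SOURCE A (Python) =====
-- def arrangeWords(text: str) -> str:
--     words = text.split()
--     words[0] = words[0].lower()
--     words.sort(key=len)
--     words[0] = words[0].title()
--     return " ".join(words)
--
--     words = text.split(' ')
--     hm = defaultdict(list)
--     for i, word in enumerate(words):
--         hm[len(word)].append(word.lower())
--     ans = []
--     for _, v in sorted(hm.items()):
--         ans.extend(v)
--     ans =  ' '.join(ans)
--     ans = ans[0].upper() + ans[1:]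
--     return ans
-- ===== SOURCE B (Python) =====
-- def arrangeWords(text: str) -> str:
--     words = text.split()
--     words[0] = words[0].lower()
--     buckets = {}
--     for w in words:
--         buckets[len(w)] = buckets.get(len(w), []) + [w]
--     res = []
--     for L in sorted(buckets):
--         res.extend(buckets[L])
--     res[0] = res[0].title()
--     return " ".join(res)
-- ===== Notes on version B (the rewrite author's own statement) =====
-- stated objective: alternative
-- what changed: Replaces the stable list.sort(key=len) with a length-keyed dict of buckets built in one pass (preserving original order within each length) and a scan over the sorted keys, so no comparison sort of the words is performed.
import Mathlib
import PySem

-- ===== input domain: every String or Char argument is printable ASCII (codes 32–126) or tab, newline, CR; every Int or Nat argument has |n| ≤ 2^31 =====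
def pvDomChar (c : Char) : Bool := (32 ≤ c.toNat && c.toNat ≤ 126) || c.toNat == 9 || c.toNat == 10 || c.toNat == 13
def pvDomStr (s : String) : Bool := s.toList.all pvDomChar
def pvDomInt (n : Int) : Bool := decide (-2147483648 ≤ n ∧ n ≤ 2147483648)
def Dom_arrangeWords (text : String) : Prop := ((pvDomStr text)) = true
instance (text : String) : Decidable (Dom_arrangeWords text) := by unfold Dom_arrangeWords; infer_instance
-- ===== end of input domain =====

-- B replaces A's stable sort-by-length with a one-pass dict of length buckets plus a scan
-- over the sorted keys (same return value; no speed claim).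

-- shared helper: Python str.title() on one char list; exact on ASCII (cased = alphabetic there):
-- a letter is uppercased after a non-cased character, lowercased after a cased one.
def pyTitleChars (prevCased : Bool) : List Char → List Char
  | [] => []
  | c :: cs =>
    if PySem.Chars.isalpha c then
      (if prevCased then PySem.Chars.lowerChar c else PySem.Chars.upperChar c) :: pyTitleChars true cs
    else
      c :: pyTitleChars false cs

-- Python s.title()
def pyTitle (s : String) : String := String.ofList (pyTitleChars false s.toList)

-- ===== PORT A =====
def arrangeWords (text : String) : String :=
  let words := PySem.Str.split₀ text
  match words with
  | [] => ""          -- Python raises IndexError at words[0]; excluded by Pre_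
  | w :: ws =>
    let words := PySem.Str.lower w :: ws           -- words[0] = words[0].lower()
    let words := PySem.List.sorted words PySem.Str.len false    -- words.sort(key=len)
    match words with
    | [] => ""        -- unreachable (sorted of a nonempty list)
    | x :: xs => PySem.Str.join " " (pyTitle x :: xs)   -- words[0] = words[0].title(); " ".join

-- ===== PORT B =====
-- res[0] = res[0].title() on the result list (Python raises IndexError on []; excluded by Pre_)
def titleFirst : List String → List String
  | [] => []
  | x :: xs => pyTitle x :: xs

def arrangeWords_alt (text : String) : String :=
  match PySem.Str.split₀ text with
  | [] => ""          -- Python raises IndexError at words[0]; excluded by Pre_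
  | w :: ws =>
    let words := PySem.Str.lower w :: ws           -- words[0] = words[0].lower()
    -- buckets[len(w)] = buckets.get(len(w), []) + [w]
    let buckets := words.foldl
      (fun d v => d.modify (PySem.Str.len v) [] (fun l => l ++ [v])) PySem.Dict.empty
    -- for L in sorted(buckets): res.extend(buckets[L])
    let res := (PySem.List.sorted (PySem.Dict.keys buckets) (fun k => k) false).foldl
      (fun acc L => acc ++ PySem.Dict.getD buckets L []) []
    PySem.Str.join " " (titleFirst res)

-- ===== PRECONDITION & SPEC =====
-- Pre_ excludes empty/whitespace-only text, where both A and B raise IndexError at words[0].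
def Pre_arrangeWords (text : String) : Prop := PySem.Str.split₀ text ≠ []
instance (text : String) : Decidable (Pre_arrangeWords text) := by unfold Pre_arrangeWords; infer_instance
def pvWitness_arrangeWords : String := "Leetcode is Cool"

def Spec_arrangeWords (text : String) (out : String) : Prop := out = arrangeWords_alt text
instance (text : String) (out : String) : Decidable (Spec_arrangeWords text out) := by unfold Spec_arrangeWords; infer_instance

-- ===== CLAIM (what is proved, stated in full; the proofs are below) =====
def Claim_equal_arrangeWords : Prop := ∀ (text : String), Dom_arrangeWords text → Pre_arrangeWords text → Spec_arrangeWords text (arrangeWords text)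

-- ===== LEMMAS AND PROOFS =====

-- buckets of xs over the length range [a, b)
def pvBuckets {α : Type} (key : α → Int) (xs : List α) (a b : Int) : List α :=
  (PySem.List.pyRange a b).flatMap (fun L => xs.filter (fun v => decide (key v = L)))

theorem pvBuckets_nil {α : Type} (key : α → Int) (a b : Int) : pvBuckets key [] a b = [] := by
  simp [pvBuckets]

theorem insertBy_append_notBefore {α : Type} (before : α → α → Bool) (x : α) (as bs : List α)
    (h : ∀ a ∈ as, before x a = false) :
    PySem.List.insertBy before x (as ++ bs) = as ++ PySem.List.insertBy before x bs := by
  induction as with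
  | nil => rfl
  | cons a as ih =>
    have ha : before x a = false := h a (by simp)
    simp [PySem.List.insertBy, ha, ih (fun y hy => h y (by simp [hy]))]

theorem insertBy_cons_of_before {α : Type} (before : α → α → Bool) (x : α) (bs : List α)
    (h : ∀ b ∈ bs, before x b = true) :
    PySem.List.insertBy before x bs = x :: bs := by
  cases bs with
  | nil => rfl
  | cons b bs => simp [PySem.List.insertBy, h b (by simp)]

theorem mem_pvBuckets_key {α : Type} (key : α → Int) (xs : List α) (a b : Int) (y : α)
    (hy : y ∈ pvBuckets key xs a b) : a ≤ key y ∧ key y < b := by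
  simp only [pvBuckets, List.mem_flatMap, List.mem_filter, decide_eq_true_eq] at hy
  obtain ⟨L, hL, _, hk⟩ := hy
  rw [PySem.List.mem_pyRange_one] at hL
  omega

theorem pvBuckets_append_notin {α : Type} (key : α → Int) (xs : List α) (x : α) (a b : Int)
    (h : ¬ (a ≤ key x ∧ key x < b)) :
    pvBuckets key (xs ++ [x]) a b = pvBuckets key xs a b := by
  unfold pvBuckets
  apply List.flatMap_congr
  intro L hL
  rw [PySem.List.mem_pyRange_one] at hL
  have hne : ¬ key x = L := by omega
  simp [List.filter_append, hne]

theorem pvBuckets_split {α : Type} (key : α → Int) (xs : List α) (a m b : Int)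
    (h1 : a ≤ m) (h2 : m ≤ b) :
    pvBuckets key xs a b = pvBuckets key xs a m ++ pvBuckets key xs m b := by
  unfold pvBuckets
  rw [PySem.List.pyRange_one_append a m b h1 h2, List.flatMap_append]

theorem pvBuckets_singleton_range {α : Type} (key : α → Int) (xs : List α) (k : Int) :
    pvBuckets key xs k (k + 1) = xs.filter (fun v => decide (key v = k)) := by
  unfold pvBuckets
  rw [PySem.List.pyRange_one_cons (by omega)]
  have : PySem.List.pyRange (k + 1) (k + 1) = [] := by simp
  simp [this]

theorem insertBy_pvBuckets {α : Type} (key : α → Int) (xs : List α) (x : α) (m : Int)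
    (hx0 : 0 ≤ key x) (hxm : key x ≤ m) :
    PySem.List.insertBy (fun p q => decide (key p < key q)) x (pvBuckets key xs 0 (m + 1))
      = pvBuckets key (xs ++ [x]) 0 (m + 1) := by
  have hsplitL : pvBuckets key xs 0 (m + 1)
      = pvBuckets key xs 0 (key x + 1) ++ pvBuckets key xs (key x + 1) (m + 1) :=
    pvBuckets_split key xs 0 (key x + 1) (m + 1) (by omega) (by omega)
  rw [hsplitL]
  rw [insertBy_append_notBefore _ x _ _ (by
    intro a ha
    have := mem_pvBuckets_key key xs 0 (key x + 1) a ha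
    simp only [decide_eq_false_iff_not, not_lt]
    omega)]
  rw [insertBy_cons_of_before _ x _ (by
    intro b hb
    have := mem_pvBuckets_key key xs (key x + 1) (m + 1) b hb
    simp only [decide_eq_true_eq]
    omega)]
  rw [pvBuckets_split key (xs ++ [x]) 0 (key x + 1) (m + 1) (by omega) (by omega)]
  rw [pvBuckets_append_notin key xs x (key x + 1) (m + 1) (by omega)]
  rw [pvBuckets_split key xs 0 (key x) (key x + 1) (by omega) (by omega)]
  rw [pvBuckets_split key (xs ++ [x]) 0 (key x) (key x + 1) (by omega) (by omega)]
  rw [pvBuckets_append_notin key xs x 0 (key x) (by omega)]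
  rw [pvBuckets_singleton_range, pvBuckets_singleton_range]
  simp [List.filter_append]

theorem sorted_eq_pvBuckets {α : Type} (key : α → Int) (xs : List α) (m : Int)
    (h : ∀ y ∈ xs, 0 ≤ key y ∧ key y ≤ m) :
    PySem.List.sorted xs key false = pvBuckets key xs 0 (m + 1) := by
  rw [PySem.List.sorted_eq_foldl_insertBy]
  induction xs using List.reverseRecOn with
  | nil => simp [pvBuckets_nil]
  | append_singleton xs x ih =>
    rw [List.foldl_append]
    simp only [List.foldl_cons, List.foldl_nil]
    rw [ih (fun y hy => h y (by simp [hy]))]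
    exact insertBy_pvBuckets key xs x m (h x (by simp)).1 (h x (by simp)).2

theorem len_nonneg (s : String) : 0 ≤ PySem.Str.len s := by
  rw [PySem.Str.len_eq]
  positivity

-- pyRange with step 1 is strictly increasing
theorem pyRange_pairwise_lt : ∀ (n : Nat) (a b : Int), (b - a).toNat ≤ n →
    (PySem.List.pyRange a b).Pairwise (fun p q => p < q)
  | 0, a, b, h => by
    have hab : ¬ a < b := by omega
    have : PySem.List.pyRange a b = [] := by
      simp [PySem.List.pyRange]; omega
    simp [this]
  | n + 1, a, b, h => by
    by_cases hab : a < b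
    · rw [PySem.List.pyRange_one_cons hab]
      refine List.Pairwise.cons ?_ (pyRange_pairwise_lt n (a + 1) b (by omega))
      intro y hy
      rw [PySem.List.mem_pyRange_one] at hy
      omega
    · have : PySem.List.pyRange a b = [] := by
        simp [PySem.List.pyRange]; omega
      simp [this]

-- dropping a filter under flatMap when the function is empty off the predicate
theorem flatMap_filter_eq {α β : Type} (l : List α) (p : α → Bool) (f : α → List β)
    (h : ∀ x ∈ l, p x = false → f x = []) :
    (l.filter p).flatMap f = l.flatMap f := by
  induction l with
  | nil => rfl
  | cons a l ih =>
    by_cases ha : p a = true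
    · simp [ha, ih (fun x hx => h x (by simp [hx]))]
    · simp only [Bool.not_eq_true] at ha
      simp [ha, ih (fun x hx => h x (by simp [hx])),
            h a (by simp) ha]

-- a Nodup Int list with all members in [0, m] sorted by identity is the range filtered to it
theorem sorted_keys_eq_range_filter (ks : List Int) (m : Int) (hnd : ks.Nodup)
    (hb : ∀ k ∈ ks, 0 ≤ k ∧ k ≤ m) :
    PySem.List.sorted ks (fun k => k) false
      = (PySem.List.pyRange 0 (m + 1)).filter (fun L => decide (L ∈ ks)) := by
  apply PySem.List.sorted_eq_of_perm_of_pairwise_lt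
  · rw [List.perm_ext_iff_of_nodup]
    · intro L
      simp only [List.mem_filter, decide_eq_true_eq, PySem.List.mem_pyRange_one]
      constructor
      · rintro ⟨_, hL⟩; exact hL
      · intro hL; exact ⟨by have := hb L hL; omega, hL⟩
    · exact ((pyRange_pairwise_lt (m + 1 - 0).toNat 0 (m + 1) (by omega)).filter _).imp
        (fun h => ne_of_lt h)
    · exact hnd
  · exact (pyRange_pairwise_lt (m + 1 - 0).toNat 0 (m + 1) (by omega)).filter _

-- ===== VERDICT (by name: the statement is the Claim_ definition above) =====
theorem arrangeWords_spec : Claim_equal_arrangeWords := by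
  intro text _ hpre
  unfold Spec_arrangeWords arrangeWords arrangeWords_alt
  cases hw : PySem.Str.split₀ text with
  | nil => exact absurd hw hpre
  | cons w ws =>
    simp only
    set words := PySem.Str.lower w :: ws with hwords
    -- bound on the lengths used by the proof only
    set m := words.foldl (fun acc y => max acc (PySem.Str.len y)) 0 with hm
    have hbound : ∀ y ∈ words, 0 ≤ PySem.Str.len y ∧ PySem.Str.len y ≤ m := by
      intro y hy
      exact ⟨len_nonneg y, (PySem.List.le_foldl_max_int words PySem.Str.len 0).2 y hy⟩
    have hm0 : 0 ≤ m := (PySem.List.le_foldl_max_int words PySem.Str.len 0).1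
    -- B's buckets dict, rewritten as a fold over (len w, w) pairs
    set buckets := words.foldl
      (fun d v => d.modify (PySem.Str.len v) [] (fun l => l ++ [v])) PySem.Dict.empty with hb
    have hfold : buckets = (words.map (fun v => (PySem.Str.len v, v))).foldl
        (fun d p => d.modify p.1 [] (fun l => l ++ [p.2])) PySem.Dict.empty := by
      rw [List.foldl_map]
    -- every lookup in buckets is the length-filter of words
    have hgetD : ∀ L, PySem.Dict.getD buckets L []
        = words.filter (fun v => decide (PySem.Str.len v = L)) := by
      intro L
      rw [hfold, PySem.Dict.getD_foldl_modify_append]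
      simp only [List.filter_map, Function.comp_def, List.map_map, List.map_id_fun',
        id_eq, PySem.Dict.getD_empty, List.nil_append]
      exact List.filter_congr (fun x _ => by simp only [PySem.Str.len] at *; by_cases h : (x.length : Int) = L <;> simp [h])
    -- the key list of buckets is the ordered dedup of the lengths
    have hkeys : PySem.Dict.keys buckets = PySem.Set.ofList (words.map PySem.Str.len) := by
      rw [hb, PySem.Dict.keys_foldl_modify_key words PySem.Str.len []
            (fun _ x => fun l => l ++ [x]) PySem.Dict.empty]
      rfl
    have hkeys_nd : (PySem.Dict.keys buckets).Nodup := by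
      rw [hkeys]; exact PySem.Set.nodup_ofList _
    have hkeys_mem : ∀ L, L ∈ PySem.Dict.keys buckets ↔ ∃ y ∈ words, PySem.Str.len y = L := by
      intro L
      rw [hkeys, PySem.Set.mem_ofList]
      simp [List.mem_map, eq_comm]
    -- B's result list equals the canonical bucket form
    have hres : (PySem.List.sorted (PySem.Dict.keys buckets) (fun k => k) false).foldl
        (fun acc L => acc ++ PySem.Dict.getD buckets L []) []
        = pvBuckets PySem.Str.len words 0 (m + 1) := by
      rw [PySem.List.foldl_append_eq_flatMap]
      rw [sorted_keys_eq_range_filter (PySem.Dict.keys buckets) m hkeys_nd (by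
        intro k hk
        obtain ⟨y, hy, hyl⟩ := (hkeys_mem k).mp hk
        have := hbound y hy
        omega)]
      rw [List.nil_append]
      rw [flatMap_filter_eq _ _ _ (by
        intro L _ hL
        rw [hgetD]
        rw [List.filter_eq_nil_iff]
        intro y hy hyl
        simp only [decide_eq_true_eq] at hyl
        simp only [decide_eq_false_iff_not] at hL
        exact hL ((hkeys_mem L).mpr ⟨y, hy, hyl⟩))]
      unfold pvBuckets
      apply List.flatMap_congr
      intro L _
      rw [hgetD]
    -- A's sorted list equals the same canonical bucket form
    have hsorted : PySem.List.sorted words PySem.Str.len false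
        = pvBuckets PySem.Str.len words 0 (m + 1) :=
      sorted_eq_pvBuckets PySem.Str.len words m hbound
    rw [hres, hsorted]
    -- both sides now title the first element of the same list and join
    cases hpv : pvBuckets PySem.Str.len words 0 (m + 1) with
    | nil => rfl
    | cons x xs => rfl
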